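-- pv_equiv track=rewrite | github.com/pypi-data/pypi-mirror-390 | packages/pb-dolphin/pb_dolphin-0.1.13-py3-none-any.whl/kb/ignores.py | build_ignore_set
-- ===== SOURCE A (Python) =====
-- from typing import Iterable
--
-- DEFAULT_IGNORE_PATTERNS: tuple[str, ...] = (
--     ".env",
--     ".env.*",
--     ".secrets",
--     "**/.env",
--     "**/.env.*",
--     "**/.secrets",
--     "node_modules",
--     "node_modules/**",
--     ".npm",
--     ".pnpm-store",
--     ".yarn",
--     ".yarn/cache",
--     "dist",
--     "dist/**",
--     "build",
--     "build/**",
--     "coverage",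
--     "coverage/**",
--     ".cache",
--     ".cache/**",
--     "target",
--     "target/**",
--     "vendor",
--     "vendor/**",
--     ".svelte-kit",
--     ".svelte-kit/**",
--     ".vercel",
--     ".vercel/**",
--     ".vite",
--     ".vite/**",
--     ".next",
--     ".next/**",
--     ".venv",
--     ".venv/**",
--     ".mypy_cache",
--     ".mypy_cache/**",
--     ".pytest_cache",
--     ".pytest_cache/**",
--     ".DS_Store",
--     "**/.DS_Store",
--     ".continue",
--     ".continue/**",
--     ".continue-config",
--     ".continue-config/**",
--     ".kilocode-config",
--     ".kilocode-config/**",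
-- )
--
-- def build_ignore_set(extra: Iterable[str] | None = None, exceptions: Iterable[str] | None = None) -> set[str]:
--     """Return the default ignore patterns merged with any extras, excluding exceptions."""
--     patterns = set(DEFAULT_IGNORE_PATTERNS)
--     if extra:
--         patterns.update(extra)
--
--     # Start with expanded patterns
--     expanded: set[str] = set()
--     for pattern in patterns:
--         expanded.add(pattern)
--         if "/" not in pattern and not pattern.startswith("**"):
--             expanded.add(f"**/{pattern}")
--
--     # Remove exception patterns from the final set (exceptions should NOT be ignored)
--     if exceptions:
--         for exception in exceptions:
--             expanded.discard(exception)
--             # Also remove the expanded version if it was created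
--             if "/" not in exception and not exception.startswith("**"):
--                 expanded.discard(f"**/{exception}")
--
--     return expanded
-- ===== SOURCE B (Python) =====
-- DEFAULT_IGNORE_PATTERNS: tuple[str, ...] = (
--     ".env", ".env.*", ".secrets", "**/.env", "**/.env.*", "**/.secrets",
--     "node_modules", "node_modules/**", ".npm", ".pnpm-store", ".yarn",
--     ".yarn/cache", "dist", "dist/**", "build", "build/**", "coverage",
--     "coverage/**", ".cache", ".cache/**", "target", "target/**", "vendor",
--     "vendor/**", ".svelte-kit", ".svelte-kit/**", ".vercel", ".vercel/**",
--     ".vite", ".vite/**", ".next", ".next/**", ".venv", ".venv/**",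
--     ".mypy_cache", ".mypy_cache/**", ".pytest_cache", ".pytest_cache/**",
--     ".DS_Store", "**/.DS_Store", ".continue", ".continue/**",
--     ".continue-config", ".continue-config/**", ".kilocode-config",
--     ".kilocode-config/**",
-- )
--
--
-- def build_ignore_set(extra=None, exceptions=None):
--     """Return the default ignore patterns merged with any extras, excluding exceptions."""
--     exc = set(exceptions) if exceptions else set()
--
--     def dropped(q):
--         """Is q excluded by an exception, either literally or as the '**/' form
--         that the expansion of some exception would also have removed?"""
--         if q in exc:
--             return True
--         if q.startswith("**/"):
--             t = q[3:]
--             return "/" not in t and not t.startswith("**") and t in exc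
--         return False
--
--     result = set()
--     for p in DEFAULT_IGNORE_PATTERNS + tuple(extra or ()):
--         if not dropped(p):
--             result.add(p)
--         if "/" not in p and not p.startswith("**"):
--             g = "**/" + p
--             if not dropped(g):
--                 result.add(g)
--     return result
-- ===== Notes on version B (the rewrite author's own statement) =====
-- stated objective: alternative
-- what changed: A expands every base pattern into a set and then expands the exceptions too, subtracting them in a second mutation loop; B never expands the exceptions: it puts them in one lookup set and builds the result in a single pass over default+extra, testing each candidate with an inverse predicate that strips a '**/' prefix (q[3:]) to decide whether some exception's expansion would have removed it.
import Mathlib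
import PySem

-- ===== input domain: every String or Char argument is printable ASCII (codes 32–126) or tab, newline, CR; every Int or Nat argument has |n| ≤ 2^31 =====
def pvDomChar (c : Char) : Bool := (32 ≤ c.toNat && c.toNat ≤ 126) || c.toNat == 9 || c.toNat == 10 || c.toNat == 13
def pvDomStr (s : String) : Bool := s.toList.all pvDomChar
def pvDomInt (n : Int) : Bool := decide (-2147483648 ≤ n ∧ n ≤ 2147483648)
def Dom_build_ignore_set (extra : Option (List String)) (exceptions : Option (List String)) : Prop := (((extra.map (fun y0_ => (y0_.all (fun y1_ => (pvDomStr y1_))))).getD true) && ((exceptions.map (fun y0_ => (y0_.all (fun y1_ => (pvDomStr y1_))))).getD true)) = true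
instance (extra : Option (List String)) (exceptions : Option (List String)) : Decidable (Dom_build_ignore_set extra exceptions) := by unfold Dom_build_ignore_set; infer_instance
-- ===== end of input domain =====

-- B never expands the exceptions: it builds the result in ONE pass over default+extra,
-- filtering each candidate with an inverse predicate ("would some exception have removed
-- this string?") that inspects a '**/' prefix instead of subtracting an expanded
-- exception set afterwards (objective: alternative).


def DEFAULT_IGNORE_PATTERNS : List String := [
  ".env", ".env.*", ".secrets", "**/.env", "**/.env.*", "**/.secrets",
  "node_modules", "node_modules/**", ".npm", ".pnpm-store", ".yarn",
  ".yarn/cache", "dist", "dist/**", "build", "build/**", "coverage",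
  "coverage/**", ".cache", ".cache/**", "target", "target/**", "vendor",
  "vendor/**", ".svelte-kit", ".svelte-kit/**", ".vercel", ".vercel/**",
  ".vite", ".vite/**", ".next", ".next/**", ".venv", ".venv/**",
  ".mypy_cache", ".mypy_cache/**", ".pytest_cache", ".pytest_cache/**",
  ".DS_Store", "**/.DS_Store", ".continue", ".continue/**",
  ".continue-config", ".continue-config/**", ".kilocode-config",
  ".kilocode-config/**"]

-- ===== PORT A =====
-- 'for pattern in patterns' iterates a set but only builds another set, and the
-- result is a set, so the unmodelled hash order does not affect the result.
def build_ignore_set (extra : Option (List String)) (exceptions : Option (List String)) : List String :=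
  let patterns : PySem.Set String := PySem.Set.ofList DEFAULT_IGNORE_PATTERNS
  let patterns : PySem.Set String :=
    match extra with
    | some l => if l.isEmpty then patterns else PySem.Set.update patterns l
    | none => patterns
  let expanded : PySem.Set String :=
    patterns.foldl (fun acc pattern =>
      let acc := PySem.Set.add acc pattern
      if !PySem.Str.isIn "/" pattern && !PySem.Str.startswith pattern "**" then
        PySem.Set.add acc ("**/" ++ pattern)
      else acc) PySem.Set.empty
  match exceptions with
  | some l =>
      if l.isEmpty then expanded else
        l.foldl (fun acc exception =>
          let acc := PySem.Set.discard acc exception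
          if !PySem.Str.isIn "/" exception && !PySem.Str.startswith exception "**" then
            PySem.Set.discard acc ("**/" ++ exception)
          else acc) expanded
  | none => expanded

-- ===== PORT B =====
-- dropped(q) of Source B: would the exceptions have removed q (literally, or as the
-- '**/' form some exception's own expansion also removes)?  q[3:] is Str.slice.
def pvDropped (exc : PySem.Set String) (q : String) : Bool :=
  if PySem.Set.contains exc q then true
  else if PySem.Str.startswith q "**/" then
    let t := PySem.Str.slice q (some 3) none
    !PySem.Str.isIn "/" t && !PySem.Str.startswith t "**" && PySem.Set.contains exc t
  else false

def build_ignore_set_alt (extra : Option (List String)) (exceptions : Option (List String)) : List String :=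
  let exc : PySem.Set String :=
    match exceptions with
    | some l => if l.isEmpty then PySem.Set.empty else PySem.Set.ofList l
    | none => PySem.Set.empty
  (DEFAULT_IGNORE_PATTERNS ++ (extra.getD [])).foldl (fun result p =>
    let result := if !pvDropped exc p then PySem.Set.add result p else result
    if !PySem.Str.isIn "/" p && !PySem.Str.startswith p "**" then
      let g := "**/" ++ p
      if !pvDropped exc g then PySem.Set.add result g else result
    else result) PySem.Set.empty

-- ===== PRECONDITION & SPEC =====
def Spec_build_ignore_set (extra : Option (List String)) (exceptions : Option (List String)) (out : List String) : Prop := out = build_ignore_set_alt extra exceptions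
instance (extra : Option (List String)) (exceptions : Option (List String)) (out : List String) : Decidable (Spec_build_ignore_set extra exceptions out) := by unfold Spec_build_ignore_set; infer_instance

-- ===== CLAIM =====
def Claim_equal_build_ignore_set : Prop := ∀ (extra : Option (List String)) (exceptions : Option (List String)), Dom_build_ignore_set extra exceptions → Spec_build_ignore_set extra exceptions (build_ignore_set extra exceptions)

-- ===== LEMMAS AND PROOFS =====

-- the expansion rule both programs share, as a list-valued function (proof device)
def pvExpand (p : String) : List String :=
  if !PySem.Str.isIn "/" p && !PySem.Str.startswith p "**" then [p, "**/" ++ p]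
  else [p]

-- a loop whose body folds an operation over (f p) is the fold over the flatMap
theorem foldl_flatMap_op {α β : Type} (op : β → α → β)
    (f : α → List α) (l : List α) (s : β) :
    l.foldl (fun acc p => (f p).foldl op acc) s = (l.flatMap f).foldl op s := by
  induction l generalizing s with
  | nil => rfl
  | cons a t ih => simp [List.flatMap_cons, List.foldl_append, ih]

-- A's add step (after let-substitution) is the fold of add over pvExpand
theorem addStep_eq (acc : PySem.Set String) (p : String) :
    (if !PySem.Str.isIn "/" p && !PySem.Str.startswith p "**" then
       PySem.Set.add (PySem.Set.add acc p) ("**/" ++ p)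
     else PySem.Set.add acc p) = (pvExpand p).foldl PySem.Set.add acc := by
  unfold pvExpand
  split <;> simp [List.foldl]

-- A's discard step (after let-substitution) is the fold of discard over pvExpand
theorem discardStep_eq (acc : PySem.Set String) (e : String) :
    (if !PySem.Str.isIn "/" e && !PySem.Str.startswith e "**" then
       PySem.Set.discard (PySem.Set.discard acc e) ("**/" ++ e)
     else PySem.Set.discard acc e) = (pvExpand e).foldl PySem.Set.discard acc := by
  unfold pvExpand
  split <;> simp [List.foldl]

-- B's body (after let-substitution) is the fold of the conditional add over pvExpand
theorem condAddStep_eq (exc : PySem.Set String) (acc : PySem.Set String) (p : String) :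
    (if !PySem.Str.isIn "/" p && !PySem.Str.startswith p "**" then
       (if !pvDropped exc ("**/" ++ p) then
          PySem.Set.add (if !pvDropped exc p then PySem.Set.add acc p else acc) ("**/" ++ p)
        else (if !pvDropped exc p then PySem.Set.add acc p else acc))
     else (if !pvDropped exc p then PySem.Set.add acc p else acc))
    = (pvExpand p).foldl (fun s q => if !pvDropped exc q then PySem.Set.add s q else s) acc := by
  unfold pvExpand
  split <;> simp [List.foldl]

-- sequentially discarding every element of L is one filter against L
theorem foldl_discard_eq_filter (L : List String) (s : PySem.Set String) :
    L.foldl PySem.Set.discard s = s.filter (fun x => !L.contains x) := by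
  induction L generalizing s with
  | nil => simp
  | cons a t ih =>
      simp only [List.foldl_cons, ih, PySem.Set.discard, List.filter_filter]
      apply List.filter_congr
      intro x _
      by_cases h : x = a <;> simp [h]

-- A's expansion loop builds exactly set(flatMap pvExpand patterns)
theorem expanded_eq (pats : List String) :
    pats.foldl (fun (acc : PySem.Set String) pattern =>
      if !PySem.Str.isIn "/" pattern && !PySem.Str.startswith pattern "**" then
        PySem.Set.add (PySem.Set.add acc pattern) ("**/" ++ pattern)
      else PySem.Set.add acc pattern) (PySem.Set.empty : PySem.Set String)
      = PySem.Set.ofList (pats.flatMap pvExpand) := by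
  rw [show (fun (acc : PySem.Set String) pattern =>
      if !PySem.Str.isIn "/" pattern && !PySem.Str.startswith pattern "**" then
        PySem.Set.add (PySem.Set.add acc pattern) ("**/" ++ pattern)
      else PySem.Set.add acc pattern) = (fun acc p => (pvExpand p).foldl PySem.Set.add acc) from
      funext fun acc => funext (addStep_eq acc)]
  rw [foldl_flatMap_op]
  rfl

-- A's exception loop removes exactly set(flatMap pvExpand L)
theorem excepted_eq (L : List String) (s : PySem.Set String) :
    L.foldl (fun (acc : PySem.Set String) exception =>
      if !PySem.Str.isIn "/" exception && !PySem.Str.startswith exception "**" then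
        PySem.Set.discard (PySem.Set.discard acc exception) ("**/" ++ exception)
      else PySem.Set.discard acc exception) s
      = s.filter (fun x => !(L.flatMap pvExpand).contains x) := by
  rw [show (fun (acc : PySem.Set String) exception =>
      if !PySem.Str.isIn "/" exception && !PySem.Str.startswith exception "**" then
        PySem.Set.discard (PySem.Set.discard acc exception) ("**/" ++ exception)
      else PySem.Set.discard acc exception) = (fun acc e => (pvExpand e).foldl PySem.Set.discard acc) from
      funext fun acc => funext (discardStep_eq acc)]
  rw [foldl_flatMap_op, foldl_discard_eq_filter]

-- removing the '**/' prefix of '**/' ++ e gives back e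
theorem slice3_append (e : String) : PySem.Str.slice ("**/" ++ e) (some 3) none = e := by
  rw [← String.toList_inj, PySem.Str.toList_slice, PySem.Chars.slice_eq_listSlice]
  rw [show (3:Int) = ((3:Nat):Int) from rfl, PySem.List.slice_from_natCast]
  simp [String.toList_append]

-- a string starting with '**/' is '**/' ++ its tail q[3:]
theorem startswith_decomp (q : String) (h : PySem.Str.startswith q "**/" = true) :
    q = "**/" ++ PySem.Str.slice q (some 3) none := by
  rw [PySem.Str.startswith_eq, PySem.Chars.startswith_iff] at h
  obtain ⟨t, ht⟩ := h
  rw [← String.toList_inj, String.toList_append, PySem.Str.toList_slice,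
      PySem.Chars.slice_eq_listSlice,
      show (3:Int) = ((3:Nat):Int) from rfl, PySem.List.slice_from_natCast, ← ht]
  rfl

theorem startswith_append_self (e : String) :
    PySem.Str.startswith ("**/" ++ e) "**/" = true := by
  rw [PySem.Str.startswith_eq, PySem.Chars.startswith_iff, String.toList_append]
  exact List.prefix_append _ _

-- membership in pvExpand e
theorem mem_pvExpand (q e : String) :
    q ∈ pvExpand e ↔ q = e ∨
      ((!PySem.Str.isIn "/" e && !PySem.Str.startswith e "**") = true ∧ q = "**/" ++ e) := by
  unfold pvExpand
  split <;> rename_i h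
  · simp only [List.mem_cons, List.not_mem_nil, or_false, h, true_and]
  · simp only [List.mem_cons, List.not_mem_nil, or_false]
    constructor
    · exact Or.inl
    · rintro (rfl | ⟨hc, rfl⟩)
      · rfl
      · exact absurd hc h

-- B's dropped predicate is exactly membership in the expanded exception list
theorem dropped_eq_contains (E : List String) (q : String) :
    pvDropped (PySem.Set.ofList E) q = (E.flatMap pvExpand).contains q := by
  rw [Bool.eq_iff_iff]
  unfold pvDropped
  rw [List.contains_eq_mem]
  simp only [PySem.Set.contains_eq_listContains, decide_eq_true_eq,
    List.mem_flatMap]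
  constructor
  · intro h
    split at h
    · rename_i hq
      rw [List.contains_eq_mem] at hq
      exact ⟨q, by simpa using hq, by simp [mem_pvExpand]⟩
    · split at h
      · rename_i hsw
        simp only [Bool.and_eq_true] at h
        obtain ⟨⟨h1, h2⟩, h3⟩ := h
        rw [List.contains_eq_mem] at h3
        refine ⟨PySem.Str.slice q (some 3) none, by simpa using h3, ?_⟩
        rw [mem_pvExpand]
        exact Or.inr ⟨(by simp only [Bool.and_eq_true]; exact ⟨h1, h2⟩), startswith_decomp q hsw⟩
      · exact absurd h (by simp)
  · rintro ⟨e, heE, hq⟩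
    rw [mem_pvExpand] at hq
    rcases hq with rfl | ⟨hc, rfl⟩
    · simp [List.contains_eq_mem, heE]
    · split
      · rfl
      · rename_i hnc
        rw [List.contains_eq_mem] at hnc
        rw [startswith_append_self e, if_pos rfl, slice3_append]
        simp only [Bool.and_eq_true] at hc ⊢
        exact ⟨hc, by simp [List.contains_eq_mem, heE]⟩

-- update absorbs a list of elements already present
theorem update_absorb (s : PySem.Set String) (ys : List String) (h : ∀ y ∈ ys, y ∈ s) :
    PySem.Set.update s ys = s := by
  rw [PySem.Set.update_eq_append_filter]
  have : (PySem.Set.ofList ys).filter (fun y => !(PySem.Set.contains s y)) = [] := by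
    rw [List.filter_eq_nil_iff]
    intro y hy
    have hys := h y ((PySem.Set.mem_ofList ys y).1 hy)
    simpa using hys
  rw [this, List.append_nil]

-- deduplicating the base before expanding does not change the expanded set
theorem ofList_flatMap_ofList (f : String → List String) (xs : List String) :
    PySem.Set.ofList ((PySem.Set.ofList xs).flatMap f) = PySem.Set.ofList (xs.flatMap f) := by
  induction xs using List.reverseRecOn with
  | nil => rfl
  | append_singleton xs x ih =>
      rw [PySem.Set.ofList_append_singleton, List.flatMap_append, PySem.Set.ofList_append,
          PySem.Set.add_eq_ite]
      split
      · rename_i hx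
        rw [ih]
        have hmem : ∀ y ∈ f x, y ∈ PySem.Set.ofList (xs.flatMap f) := by
          intro y hy
          rw [PySem.Set.mem_ofList]
          exact List.mem_flatMap.2 ⟨x, (PySem.Set.mem_ofList xs x).1 hx, hy⟩
        simp only [List.flatMap_cons, List.flatMap_nil, List.append_nil]
        exact (update_absorb _ _ hmem).symm
      · rw [List.flatMap_append, PySem.Set.ofList_append, ih]

-- discarding an absent element is a no-op
theorem discard_not_mem (s : PySem.Set String) (x : String) (h : x ∉ s) :
    PySem.Set.discard s x = s := by
  unfold PySem.Set.discard
  apply List.filter_eq_self.2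
  intro y hy
  have hne : y ≠ x := fun e => h (e ▸ hy)
  simp [hne]

-- filtering commutes with set(·)
theorem filter_ofList (pred : String → Bool) (L : List String) :
    (PySem.Set.ofList L).filter pred = PySem.Set.ofList (L.filter pred) := by
  induction L with
  | nil => rfl
  | cons x xs ih =>
      have key : List.filter pred (PySem.Set.discard (PySem.Set.ofList xs) x)
          = PySem.Set.discard (PySem.Set.ofList (xs.filter pred)) x := by
        unfold PySem.Set.discard
        rw [List.filter_filter, ← ih, List.filter_filter]
        apply List.filter_congr
        intro y _
        rw [Bool.and_comm]
      rw [PySem.Set.ofList_cons, List.filter_cons, key]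
      by_cases hp : pred x
      · rw [if_pos hp, List.filter_cons_of_pos hp, PySem.Set.ofList_cons]
      · rw [if_neg hp, List.filter_cons_of_neg (by simpa using hp)]
        apply discard_not_mem
        intro hx
        have hxm := (PySem.Set.mem_ofList (xs.filter pred) x).1 hx
        rw [List.mem_filter] at hxm
        exact hp hxm.2

-- B's loop is set(filter (not dropped) (flatMap pvExpand L))
theorem alt_loop_eq (exc : PySem.Set String) (L : List String) :
    L.foldl (fun result p =>
      let result := if !pvDropped exc p then PySem.Set.add result p else result
      if !PySem.Str.isIn "/" p && !PySem.Str.startswith p "**" then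
        let g := "**/" ++ p
        if !pvDropped exc g then PySem.Set.add result g else result
      else result) (PySem.Set.empty : PySem.Set String)
    = PySem.Set.ofList ((L.flatMap pvExpand).filter (fun q => !pvDropped exc q)) := by
  rw [show (fun (result : PySem.Set String) p =>
      let result := if !pvDropped exc p then PySem.Set.add result p else result
      if !PySem.Str.isIn "/" p && !PySem.Str.startswith p "**" then
        let g := "**/" ++ p
        if !pvDropped exc g then PySem.Set.add result g else result
      else result)
      = (fun acc p => (pvExpand p).foldl (fun s q => if !pvDropped exc q then PySem.Set.add s q else s) acc) from
      funext fun acc => funext (condAddStep_eq exc acc)]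
  rw [foldl_flatMap_op, ← List.foldl_filter]
  rfl

-- dropped against the empty exception set is constantly false
theorem dropped_empty (q : String) : pvDropped PySem.Set.empty q = false := by
  unfold pvDropped
  simp [PySem.Set.contains, PySem.Set.empty]

-- the common core: A's set difference equals B's filtered one-pass build
theorem core_eq (L E : List String) :
    ((PySem.Set.ofList ((PySem.Set.ofList L).flatMap pvExpand)).filter
        (fun x => !(E.flatMap pvExpand).contains x))
    = PySem.Set.ofList ((L.flatMap pvExpand).filter (fun q => !pvDropped (PySem.Set.ofList E) q)) := by
  rw [ofList_flatMap_ofList, filter_ofList]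
  congr 1
  apply List.filter_congr
  intro q _
  rw [dropped_eq_contains]

-- ===== VERDICT =====
set_option maxRecDepth 8192 in
theorem build_ignore_set_spec : Claim_equal_build_ignore_set := by
  intro extra exceptions hdom
  clear hdom
  unfold Spec_build_ignore_set build_ignore_set build_ignore_set_alt
  have hpats : ∀ (l : List String),
      PySem.Set.update (PySem.Set.ofList DEFAULT_IGNORE_PATTERNS) l
        = PySem.Set.ofList (DEFAULT_IGNORE_PATTERNS ++ l) :=
    fun l => (PySem.Set.ofList_append DEFAULT_IGNORE_PATTERNS l).symm
  cases extra <;> cases exceptions <;> simp only [Option.getD_none, Option.getD_some]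
  case none.none =>
      rw [alt_loop_eq, expanded_eq, List.append_nil]
      rw [show (fun q => !pvDropped PySem.Set.empty q) = (fun _ => true) from
        funext fun q => by rw [dropped_empty]; rfl]
      rw [List.filter_true, ofList_flatMap_ofList pvExpand DEFAULT_IGNORE_PATTERNS]
  case none.some l =>
      cases l with
      | nil =>
          simp only [List.isEmpty_nil, if_true]
          rw [alt_loop_eq, expanded_eq, List.append_nil]
          rw [show (fun q => !pvDropped PySem.Set.empty q) = (fun _ => true) from
            funext fun q => by rw [dropped_empty]; rfl]
          rw [List.filter_true, ofList_flatMap_ofList pvExpand DEFAULT_IGNORE_PATTERNS]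
      | cons a t =>
          simp only [List.isEmpty_cons, Bool.false_eq_true, if_false]
          rw [alt_loop_eq, expanded_eq, excepted_eq, List.append_nil]
          have := core_eq DEFAULT_IGNORE_PATTERNS (a :: t)
          rw [ofList_flatMap_ofList] at this ⊢
          exact this
  case some.none le =>
      cases le with
      | nil =>
          simp only [List.isEmpty_nil, if_true]
          rw [alt_loop_eq, expanded_eq, List.append_nil]
          rw [show (fun q => !pvDropped PySem.Set.empty q) = (fun _ => true) from
            funext fun q => by rw [dropped_empty]; rfl]
          rw [List.filter_true, ofList_flatMap_ofList pvExpand DEFAULT_IGNORE_PATTERNS]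
      | cons a t =>
          simp only [List.isEmpty_cons, Bool.false_eq_true, if_false]
          rw [hpats, alt_loop_eq, expanded_eq]
          rw [show (fun q => !pvDropped PySem.Set.empty q) = (fun _ => true) from
            funext fun q => by rw [dropped_empty]; rfl]
          rw [List.filter_true, ofList_flatMap_ofList pvExpand (DEFAULT_IGNORE_PATTERNS ++ a :: t)]
  case some.some le l =>
      cases le <;> cases l
      case nil.nil =>
          simp only [List.isEmpty_nil, if_true]
          rw [alt_loop_eq, expanded_eq, List.append_nil]
          rw [show (fun q => !pvDropped PySem.Set.empty q) = (fun _ => true) from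
            funext fun q => by rw [dropped_empty]; rfl]
          rw [List.filter_true, ofList_flatMap_ofList pvExpand DEFAULT_IGNORE_PATTERNS]
      case nil.cons a t =>
          simp only [List.isEmpty_nil, List.isEmpty_cons, Bool.false_eq_true, if_true, if_false]
          rw [alt_loop_eq, expanded_eq, excepted_eq, List.append_nil]
          have := core_eq DEFAULT_IGNORE_PATTERNS (a :: t)
          rw [ofList_flatMap_ofList] at this ⊢
          exact this
      case cons.nil a t =>
          simp only [List.isEmpty_nil, List.isEmpty_cons, Bool.false_eq_true, if_true, if_false]
          rw [hpats, alt_loop_eq, expanded_eq]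
          rw [show (fun q => !pvDropped PySem.Set.empty q) = (fun _ => true) from
            funext fun q => by rw [dropped_empty]; rfl]
          rw [List.filter_true, ofList_flatMap_ofList pvExpand (DEFAULT_IGNORE_PATTERNS ++ a :: t)]
      case cons.cons a t b u =>
          simp only [List.isEmpty_cons, Bool.false_eq_true, if_false]
          rw [hpats, alt_loop_eq, expanded_eq, excepted_eq]
          have := core_eq (DEFAULT_IGNORE_PATTERNS ++ a :: t) (b :: u)
          rw [ofList_flatMap_ofList] at this ⊢
          exact this
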